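-- pv_equiv track=rewrite | github.com/bsod2528/geralt | geralt/bot.py | generate_dict_cache
-- ===== SOURCE A (Python) =====
-- from typing import Any, DefaultDict, Dict, List, Set, Tuple
--
-- def generate_dict_cache(
--         entries: List[Tuple]) -> Dict[int, Dict[int, List[str]]]:
--     cache: Dict = {}
--     for entry in entries:
--         guild_id, parent, children = entry
--         if guild_id not in cache:
--             cache[guild_id]: Dict = {}
--         if parent not in cache[guild_id]:
--             cache[guild_id][parent]: List = []
--         cache[guild_id][parent].append(children)
--     return cache
-- ===== SOURCE B (Python) =====
-- def generate_dict_cache(entries):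
--     return {
--         g: {
--             p: [c for g2, p2, c in entries if g2 == g and p2 == p]
--             for p in dict.fromkeys(p2 for g2, p2, _ in entries if g2 == g)
--         }
--         for g in dict.fromkeys(g for g, _, _ in entries)
--     }
-- ===== Notes on version B (the rewrite author's own statement) =====
-- stated objective: alternative
-- what changed: A builds the nested dict in one pass by mutating cache[guild][parent]; B is a declarative two-pass grouping: ordered dedup (dict.fromkeys) of guild ids and of each guild's parents, then one filter comprehension per (guild, parent) group collects the children.
import Mathlib
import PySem

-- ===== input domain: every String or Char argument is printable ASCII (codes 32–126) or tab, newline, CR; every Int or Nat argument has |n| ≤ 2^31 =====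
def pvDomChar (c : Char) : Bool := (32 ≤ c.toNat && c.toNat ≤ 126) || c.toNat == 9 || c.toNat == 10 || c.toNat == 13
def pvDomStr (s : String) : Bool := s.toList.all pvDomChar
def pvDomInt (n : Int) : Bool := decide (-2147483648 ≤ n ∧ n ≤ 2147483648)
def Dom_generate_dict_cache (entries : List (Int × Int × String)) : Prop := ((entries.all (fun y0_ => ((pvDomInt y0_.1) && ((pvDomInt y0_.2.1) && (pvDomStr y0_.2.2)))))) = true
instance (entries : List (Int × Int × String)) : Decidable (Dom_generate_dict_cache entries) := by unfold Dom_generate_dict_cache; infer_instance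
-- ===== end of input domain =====

-- B replaces A's one-pass mutating nested-dict build by a declarative two-pass grouping
-- (ordered dedup of the keys, then one filter per (guild, parent) group); objective: alternative.

-- ===== PORT A =====
-- A's loop body: ensure cache[guild_id] exists, ensure cache[guild_id][parent] exists,
-- then append children to cache[guild_id][parent] (ported as modify; re-stored with insert).
def genStepA (cache : PySem.Dict Int (PySem.Dict Int (List String)))
    (e : Int × Int × String) : PySem.Dict Int (PySem.Dict Int (List String)) :=
  let g := e.1; let p := e.2.1; let c := e.2.2
  let cache1 := if cache.contains g then cache else cache.insert g PySem.Dict.empty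
  let inner := cache1.getD g PySem.Dict.empty
  let inner1 := if inner.contains p then inner else inner.insert p []
  let inner2 := inner1.modify p [] (fun l => l ++ [c])
  cache1.insert g inner2

def generate_dict_cache (entries : List (Int × Int × String)) : List (Int × List (Int × List String)) :=
  ((entries.foldl genStepA PySem.Dict.empty).items).map (fun q => (q.1, q.2.items))

-- ===== PORT B =====
-- B: list(dict.fromkeys(...)) = PySem.List.dedup; for each guild the parents in first-appearance
-- order, and for each (guild, parent) the children collected by one filter over entries.
def generate_dict_cache_alt (entries : List (Int × Int × String)) : List (Int × List (Int × List String)) :=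
  (PySem.List.dedup (entries.map (·.1))).map (fun g =>
    (g, (PySem.List.dedup ((entries.filter (fun e => e.1 == g)).map (·.2.1))).map (fun p =>
      (p, (entries.filter (fun e => e.1 == g && e.2.1 == p)).map (·.2.2)))))

-- ===== PRECONDITION & SPEC =====
def Spec_generate_dict_cache (entries : List (Int × Int × String)) (out : List (Int × List (Int × List String))) : Prop := out = generate_dict_cache_alt entries
instance (entries : List (Int × Int × String)) (out : List (Int × List (Int × List String))) : Decidable (Spec_generate_dict_cache entries out) := by unfold Spec_generate_dict_cache; infer_instance

-- ===== CLAIM (what is proved, stated in full; the proofs are below) =====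
def Claim_equal_generate_dict_cache : Prop := ∀ (entries : List (Int × Int × String)), Dom_generate_dict_cache entries → Spec_generate_dict_cache entries (generate_dict_cache entries)

-- ===== LEMMAS AND PROOFS =====

-- Dict.modify is an overwrite-insert of the updated value (both keep an existing key's position
-- and append a fresh key, so this is definitional).
theorem pv_modify_eq_insert {κ ν : Type} [BEq κ] (d : PySem.Dict κ ν) (k : κ) (d0 : ν) (f : ν → ν) :
    d.modify k d0 f = d.insert k (f (d.getD k d0)) := rfl

-- A's step collapses: the two "ensure key exists" branches are absorbed by modify/insert.
theorem genStepA_eq (cache : PySem.Dict Int (PySem.Dict Int (List String))) (e : Int × Int × String) :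
    genStepA cache e =
      cache.insert e.1 ((cache.getD e.1 PySem.Dict.empty).modify e.2.1 [] (fun l => l ++ [e.2.2])) := by
  unfold genStepA
  simp only [pv_modify_eq_insert]
  by_cases hg : cache.contains e.1
  · simp only [hg, if_true]
    by_cases hp : (cache.getD e.1 PySem.Dict.empty).contains e.2.1
    · simp [hp]
    · simp only [Bool.not_eq_true] at hp
      simp [hp, PySem.Dict.getD_insert_self, PySem.Dict.getD_of_not_contains (h := hp),
        PySem.Dict.insert_insert_self]
  · simp only [Bool.not_eq_true] at hg
    simp [hg, PySem.Dict.getD_insert_self, PySem.Dict.getD_of_not_contains (h := hg),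
      PySem.Dict.insert_insert_self, PySem.Dict.contains_empty]

-- The inner dict A builds for guild g is the modify-append fold over g's (parent, child) pairs.
theorem getD_foldA (es : List (Int × Int × String)) (g : Int)
    (d : PySem.Dict Int (PySem.Dict Int (List String))) :
    (es.foldl genStepA d).getD g PySem.Dict.empty =
      ((es.filter (fun e => e.1 == g)).map (fun e => (e.2.1, e.2.2))).foldl
        (fun i pc => i.modify pc.1 [] (fun l => l ++ [pc.2])) (d.getD g PySem.Dict.empty) := by
  induction es generalizing d with
  | nil => rfl
  | cons e es ih =>
    simp only [List.foldl_cons, ih, genStepA_eq]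
    by_cases h : e.1 = g
    · subst h
      simp [PySem.Dict.getD_insert_self, pv_modify_eq_insert]
    · rw [PySem.Dict.getD_insert_of_ne (hne := Ne.symm h)]
      simp [h]

theorem keys_foldA (es : List (Int × Int × String)) :
    (es.foldl genStepA PySem.Dict.empty).keys = PySem.List.dedup (es.map (·.1)) := by
  have hf : genStepA = fun d e =>
      d.insert e.1 ((d.getD e.1 PySem.Dict.empty).modify e.2.1 [] (fun l => l ++ [e.2.2])) :=
    funext fun d => funext fun e => genStepA_eq d e
  rw [hf, PySem.Dict.keys_foldl_insert_key]
  simp [PySem.Dict.keys_empty, PySem.List.dedup_eq_ofList, PySem.Set.ofList, PySem.Set.update]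

theorem nodup_keys_foldA (es : List (Int × Int × String)) :
    (es.foldl genStepA PySem.Dict.empty).keys.Nodup := by
  have hf : genStepA = fun d e =>
      d.insert e.1 ((d.getD e.1 PySem.Dict.empty).modify e.2.1 [] (fun l => l ++ [e.2.2])) :=
    funext fun d => funext fun e => genStepA_eq d e
  rw [hf]
  exact PySem.Dict.nodup_keys_foldl_insert_key _ _ _ _ PySem.Dict.nodup_keys_empty

theorem inner_keys (pcs : List (Int × String)) :
    (pcs.foldl (fun i pc => i.modify pc.1 [] (fun l => l ++ [pc.2])) (PySem.Dict.empty : PySem.Dict Int (List String))).keys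
      = PySem.List.dedup (pcs.map (·.1)) := by
  rw [PySem.Dict.keys_foldl_modify_key]
  simp [PySem.Dict.keys_empty, PySem.List.dedup_eq_ofList, PySem.Set.ofList, PySem.Set.update]

theorem inner_nodup (pcs : List (Int × String)) :
    (pcs.foldl (fun i pc => i.modify pc.1 [] (fun l => l ++ [pc.2])) (PySem.Dict.empty : PySem.Dict Int (List String))).keys.Nodup := by
  exact PySem.Dict.nodup_keys_foldl_modify_key _ _ _ _ _ PySem.Dict.nodup_keys_empty

theorem filter_map_snd (es : List (Int × Int × String)) (g p : Int) :
    (((es.filter (fun e => e.1 == g)).map (fun e => (e.2.1, e.2.2))).filter (fun q => q.1 == p)).map (·.2) =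
      (es.filter (fun e => e.1 == g && e.2.1 == p)).map (·.2.2) := by
  simp [List.filter_map, List.filter_filter, Function.comp_def, Bool.and_comm]

theorem main_eq (entries : List (Int × Int × String)) :
    generate_dict_cache entries = generate_dict_cache_alt entries := by
  unfold generate_dict_cache generate_dict_cache_alt
  rw [PySem.Dict.items_eq_map_keys _ (nodup_keys_foldA entries) PySem.Dict.empty,
    keys_foldA, List.map_map]
  refine List.map_congr_left (fun g hg => ?_)
  simp only [Function.comp_def]
  rw [getD_foldA, PySem.Dict.getD_empty]
  rw [PySem.Dict.items_eq_map_keys _ (inner_nodup _) ([] : List String),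
    inner_keys]
  have hmap : List.map (fun x => x.1) (List.map (fun e => (e.2.1, e.2.2)) (List.filter (fun e => e.1 == g) entries))
      = List.map (fun x => x.2.1) (List.filter (fun e => e.1 == g) entries) := by
    simp [Function.comp_def]
  rw [hmap]
  refine congrArg _ (List.map_congr_left (fun p hp => ?_))
  rw [PySem.Dict.getD_foldl_modify_append, PySem.Dict.getD_empty]
  simp [filter_map_snd]

-- ===== VERDICT (by name: the statement is the Claim_ definition above) =====
theorem generate_dict_cache_spec : Claim_equal_generate_dict_cache := by
  intro entries _
  exact main_eq entries
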